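-- pv_equiv track=rewrite | github.com/t-hanya/expnote | expnote/functions/visualization.py | _split_subset_name
-- ===== SOURCE A (Python) =====
-- from typing import Optional
-- from typing import Tuple
--
-- DEFAULT_SUBSETS = {
--     'train': ('train', 'training'),
--     'val': ('val', 'validation'),
--     'test': ('test',),
--     'eval': ('eval', 'evaluation'),
-- }
--
-- DEFAULT_SUBSET_SEPARATOR = ('/', '_', '-', ':')
--
-- def _split_subset_name(metric_name: str) -> Tuple[Optional[str], str]:
--     """Split metric name into subset name and rest if subset name is found."""
--     split_patterns = {}
--     for sep in DEFAULT_SUBSET_SEPARATOR: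
--         blocks = metric_name.split(sep)
--         if len(blocks) > 1:
--             # ex) train_class_loss -> {'train': 'class_loss'}
--             split_patterns[blocks[0]] = sep.join(blocks[1:])
--             # ex) acc_val -> {'val': 'acc'}
--             split_patterns[blocks[-1]] = sep.join(blocks[:-1])
--
--     for label, candidates in DEFAULT_SUBSETS.items():
--         for candidate in candidates:
--             if candidate in split_patterns:
--                 return (label, split_patterns[candidate])
--
--     # cannot find subset name -> do not split
--     return (None, metric_name)
-- ===== SOURCE B (Python) =====
-- from typing import Optional
-- from typing import Tuple
--
-- DEFAULT_SUBSETS = {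
--     'train': ('train', 'training'),
--     'val': ('val', 'validation'),
--     'test': ('test',),
--     'eval': ('eval', 'evaluation'),
-- }
--
-- DEFAULT_SUBSET_SEPARATOR = ('/', '_', '-', ':')
--
--
-- def _find_rest(metric_name: str, candidate: str) -> Optional[str]:
--     """Remainder of metric_name around candidate, or None if no separator adjoins it."""
--     found = None
--     for sep in DEFAULT_SUBSET_SEPARATOR:
--         if metric_name.startswith(candidate + sep):
--             found = metric_name[len(candidate) + 1:]
--         if metric_name.endswith(sep + candidate):
--             found = metric_name[:len(metric_name) - len(candidate) - 1]
--     return found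
--
--
-- def _split_subset_name(metric_name: str) -> Tuple[Optional[str], str]:
--     """Split metric name into subset name and rest if subset name is found."""
--     for label, candidates in DEFAULT_SUBSETS.items():
--         for candidate in candidates:
--             rest = _find_rest(metric_name, candidate)
--             if rest is not None:
--                 return (label, rest)
--     return (None, metric_name)
-- ===== Notes on version B (the rewrite author's own statement) =====
-- stated objective: alternative
-- what changed: B discards A's split/join/dict machinery entirely: per candidate it tests startswith(candidate+sep) and endswith(sep+candidate) for each separator and extracts the remainder by direct slicing, with a None sentinel, overwriting across separators so the last matching separator and the suffix branch win exactly as A's dict overwrites did.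
import Mathlib
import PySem

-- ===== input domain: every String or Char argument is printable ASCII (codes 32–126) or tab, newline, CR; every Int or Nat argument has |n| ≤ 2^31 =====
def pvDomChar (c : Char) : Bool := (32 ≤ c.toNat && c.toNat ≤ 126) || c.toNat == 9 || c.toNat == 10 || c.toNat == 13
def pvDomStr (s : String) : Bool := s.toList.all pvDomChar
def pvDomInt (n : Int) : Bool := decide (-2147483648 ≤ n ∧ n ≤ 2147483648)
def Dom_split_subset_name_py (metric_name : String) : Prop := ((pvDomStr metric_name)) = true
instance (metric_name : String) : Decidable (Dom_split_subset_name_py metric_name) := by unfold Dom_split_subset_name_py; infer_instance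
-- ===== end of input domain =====

-- B replaces A's split/join/dict machinery by direct startswith/endswith tests with
-- slicing, per candidate (objective: alternative decomposition; same return value).

-- shared module constants: DEFAULT_SUBSET_SEPARATOR (single chars) and DEFAULT_SUBSETS
def pvSepChars : List Char := ['/', '_', '-', ':']
def pvSubsets : List (String × List (List Char)) :=
  [("train", [['t','r','a','i','n'], ['t','r','a','i','n','i','n','g']]),
   ("val", [['v','a','l'], ['v','a','l','i','d','a','t','i','o','n']]),
   ("test", [['t','e','s','t']]),
   ("eval", [['e','v','a','l'], ['e','v','a','l','u','a','t','i','o','n']])]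

-- ===== PORT A =====
-- one iteration of A's first loop: split, and on >1 blocks insert both patterns
def pvAStep (m : List Char) (d : PySem.Dict (List Char) (List Char)) (sep : Char) :
    PySem.Dict (List Char) (List Char) :=
  -- sep is a nonempty one-char separator, so split? is always `some` and getD [] never fires
  let blocks : List (List Char) := (PySem.Chars.split? m [sep]).getD []
  if 1 < blocks.length then
    (d.insert (blocks.headD []) (PySem.Chars.join [sep] (blocks.drop 1))).insert
      (blocks.getLastD []) (PySem.Chars.join [sep] blocks.dropLast)
  else d

-- inner candidate loop: 'if candidate in split_patterns: return (label, split_patterns[candidate])'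
def pvALookup (patterns : PySem.Dict (List Char) (List Char)) (label : String) :
    List (List Char) → Option (Option String × String)
  | [] => none
  | c :: cs =>
    match patterns.get? c with
    | some v => some (some label, String.ofList v)
    | none => pvALookup patterns label cs

-- outer loop over DEFAULT_SUBSETS.items()
def pvAScan (metric_name : String) (patterns : PySem.Dict (List Char) (List Char)) :
    List (String × List (List Char)) → Option String × String
  | [] => (none, metric_name)
  | (label, cands) :: rest =>
    match pvALookup patterns label cands with
    | some r => r
    | none => pvAScan metric_name patterns rest

def split_subset_name_py (metric_name : String) : Option String × String :=
  pvAScan metric_name (pvSepChars.foldl (pvAStep metric_name.toList) PySem.Dict.empty) pvSubsets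

-- ===== PORT B =====
-- one iteration of _find_rest's separator loop: prefix/suffix test plus a slice
def pvBStep (m c : List Char) (acc : Option (List Char)) (sep : Char) : Option (List Char) :=
  let acc1 := if PySem.Chars.startswith m (c ++ [sep]) then
      some (PySem.List.slice m (some (PySem.Chars.len c + 1)) none) else acc
  if PySem.Chars.endswith m (sep :: c) then
      some (PySem.List.slice m none (some (PySem.Chars.len m - PySem.Chars.len c - 1))) else acc1

-- _find_rest(metric_name, candidate)
def pvBFindRest (m c : List Char) : Option (List Char) :=
  pvSepChars.foldl (pvBStep m c) none

-- inner candidate loop: 'if rest is not None: return (label, rest)'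
def pvBScanC (m : List Char) (label : String) :
    List (List Char) → Option (Option String × String)
  | [] => none
  | c :: cs =>
    match pvBFindRest m c with
    | some v => some (some label, String.ofList v)
    | none => pvBScanC m label cs

-- outer loop over DEFAULT_SUBSETS.items()
def pvBScan (metric_name : String) : List (String × List (List Char)) → Option String × String
  | [] => (none, metric_name)
  | (label, cands) :: rest =>
    match pvBScanC metric_name.toList label cands with
    | some r => r
    | none => pvBScan metric_name rest

def split_subset_name_py_alt (metric_name : String) : Option String × String :=
  pvBScan metric_name pvSubsets

-- ===== PRECONDITION & SPEC =====
def Spec_split_subset_name_py (metric_name : String) (out : Option String × String) : Prop := out = split_subset_name_py_alt metric_name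
instance (metric_name : String) (out : Option String × String) : Decidable (Spec_split_subset_name_py metric_name out) := by unfold Spec_split_subset_name_py; infer_instance

-- ===== CLAIM (what is proved, stated in full; the proofs are below) =====
def Claim_equal_split_subset_name_py : Prop := ∀ (metric_name : String), Dom_split_subset_name_py metric_name → Spec_split_subset_name_py metric_name (split_subset_name_py metric_name)

-- ===== LEMMAS AND PROOFS =====

-- structural model of str.split on a single-character separator
def pvSplit1 (ch : Char) : List Char → List (List Char)
  | [] => [[]]
  | c :: rest => if c = ch then [] :: pvSplit1 ch rest else (pvSplit1 ch rest).modifyHead (c :: ·)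

theorem pvSplit1_ne_nil (ch : Char) (l : List Char) : pvSplit1 ch l ≠ [] := by
  induction l with
  | nil => simp [pvSplit1]
  | cons c rest ih =>
    simp only [pvSplit1]
    split_ifs
    · simp
    · cases h : pvSplit1 ch rest with
      | nil => exact absurd h ih
      | cons b t => simp [List.modifyHead]

theorem pvGo_eq (ch : Char) : ∀ (fuel : Nat) (l cur : List Char) (acc : List (List Char)),
    l.length ≤ fuel →
    PySem.Chars.splitOn.go [ch] fuel l cur acc
      = acc.reverse ++ (pvSplit1 ch l).modifyHead (cur.reverse ++ ·) := by
  intro fuel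
  induction fuel with
  | zero =>
    intro l cur acc h
    have : l = [] := List.length_eq_zero_iff.mp (Nat.le_zero.mp h)
    subst this
    simp [PySem.Chars.splitOn.go, pvSplit1, List.modifyHead]
  | succ n ih =>
    intro l cur acc h
    cases l with
    | nil => simp [PySem.Chars.splitOn.go, pvSplit1, List.modifyHead]
    | cons c rest =>
      by_cases hc : c = ch
      · subst hc
        have hpre : [c].isPrefixOf (c :: rest) = true := by simp [List.isPrefixOf]
        rw [PySem.Chars.splitOn.go]
        simp only [hpre, if_pos]
        rw [ih _ _ _ (by simpa using Nat.le_of_succ_le_succ h)]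
        cases hS : pvSplit1 c rest with
        | nil => exact absurd hS (pvSplit1_ne_nil c rest)
        | cons b t => simp [pvSplit1, List.modifyHead, hS]
      · have hpre : [ch].isPrefixOf (c :: rest) = false := by
          simp [List.isPrefixOf]; exact fun hh => absurd hh.symm hc
        rw [PySem.Chars.splitOn.go]
        rw [hpre]
        simp only [Bool.false_eq_true, if_false]
        rw [ih _ _ _ (by simpa using Nat.le_of_succ_le_succ h)]
        cases hS : pvSplit1 ch rest with
        | nil => exact absurd hS (pvSplit1_ne_nil ch rest)
        | cons b t => simp [pvSplit1, if_neg hc, hS, List.modifyHead]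

theorem pvSplitOn_single (ch : Char) (m : List Char) :
    PySem.Chars.splitOn m [ch] = pvSplit1 ch m := by
  unfold PySem.Chars.splitOn
  rw [pvGo_eq ch (m.length + 1) m [] [] (by omega)]
  cases h : pvSplit1 ch m with
  | nil => exact absurd h (pvSplit1_ne_nil ch m)
  | cons b t => simp [List.modifyHead]

theorem pvJoin_modifyHead (ch c : Char) (b : List Char) (t : List (List Char)) :
    PySem.Chars.join [ch] ((b :: t).modifyHead (c :: ·)) = c :: PySem.Chars.join [ch] (b :: t) := by
  cases t with
  | nil => simp [List.modifyHead, PySem.Chars.join_singleton]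
  | cons q r => simp [List.modifyHead, PySem.Chars.join_cons_cons]

theorem pvJoin_split1 (ch : Char) (m : List Char) :
    PySem.Chars.join [ch] (pvSplit1 ch m) = m := by
  induction m with
  | nil => simp [pvSplit1, PySem.Chars.join_singleton]
  | cons c rest ih =>
    simp only [pvSplit1]
    split_ifs with hc
    · subst hc
      cases hS : pvSplit1 c rest with
      | nil => exact absurd hS (pvSplit1_ne_nil c rest)
      | cons b t => rw [hS] at ih; simp [PySem.Chars.join_cons_cons, ih]
    · cases hS : pvSplit1 ch rest with
      | nil => exact absurd hS (pvSplit1_ne_nil ch rest)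
      | cons b t => rw [hS] at ih; rw [pvJoin_modifyHead, ih]

theorem pvSplit1_of_not_mem (ch : Char) (c : List Char) (hc : ch ∉ c) :
    pvSplit1 ch c = [c] := by
  induction c with
  | nil => simp [pvSplit1]
  | cons a c' ih =>
    have ha : a ≠ ch := fun h => hc (by simp [h])
    rw [show pvSplit1 ch (a :: c') = (pvSplit1 ch c').modifyHead (a :: ·) by
      simp [pvSplit1, if_neg ha]]
    rw [ih (fun h => hc (List.mem_cons_of_mem _ h))]
    simp [List.modifyHead]

theorem pvSplit1_prefix (ch : Char) (c t : List Char) (hc : ch ∉ c) :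
    pvSplit1 ch (c ++ ch :: t) = c :: pvSplit1 ch t := by
  induction c with
  | nil => simp [pvSplit1]
  | cons a c' ih =>
    have ha : a ≠ ch := fun h => hc (by simp [h])
    have := ih (fun h => hc (List.mem_cons_of_mem _ h))
    simp only [List.cons_append, pvSplit1, if_neg ha, this]
    simp [List.modifyHead]

theorem pvSplit1_suffix (ch : Char) (c : List Char) (hc : ch ∉ c) (t : List Char) :
    pvSplit1 ch (t ++ ch :: c) = pvSplit1 ch t ++ [c] := by
  induction t with
  | nil =>
    simp only [List.nil_append, pvSplit1, pvSplit1_of_not_mem ch c hc]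
    rfl
  | cons a t' ih =>
    by_cases ha : a = ch
    · subst ha; simp [pvSplit1, ih]
    · simp only [List.cons_append, pvSplit1, if_neg ha, ih]
      cases hS : pvSplit1 ch t' with
      | nil => exact absurd hS (pvSplit1_ne_nil ch t')
      | cons b r => simp [List.modifyHead]

theorem pvJoin_append_singleton (ch : Char) :
    ∀ (S : List (List Char)), S ≠ [] → ∀ c : List Char,
      PySem.Chars.join [ch] (S ++ [c]) = PySem.Chars.join [ch] S ++ ch :: c := by
  intro S
  induction S with
  | nil => intro h; exact absurd rfl h
  | cons b t ih =>
    intro _ c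
    cases t with
    | nil => simp [PySem.Chars.join_cons_cons, PySem.Chars.join_singleton]
    | cons q r =>
      have := ih (by simp) c
      simp only [List.cons_append] at this ⊢
      rw [PySem.Chars.join_cons_cons, PySem.Chars.join_cons_cons, this]
      simp

-- the two converse directions: a matching head/last block forces a prefix/suffix match
theorem pvHead_startswith (ch : Char) (c m : List Char)
    (hlen : 1 < (pvSplit1 ch m).length) (hhead : (pvSplit1 ch m).headD [] = c) :
    PySem.Chars.startswith m (c ++ [ch]) = true := by
  rw [PySem.Chars.startswith_iff]
  cases hS : pvSplit1 ch m with
  | nil => exact absurd hS (pvSplit1_ne_nil ch m)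
  | cons b t =>
    cases t with
    | nil => rw [hS] at hlen; simp at hlen
    | cons q r =>
      rw [hS] at hhead; simp at hhead
      subst hhead
      refine ⟨PySem.Chars.join [ch] (q :: r), ?_⟩
      have := pvJoin_split1 ch m
      rw [hS, PySem.Chars.join_cons_cons] at this
      rw [← this]

theorem pvLast_endswith (ch : Char) (c m : List Char)
    (hlen : 1 < (pvSplit1 ch m).length) (hlast : (pvSplit1 ch m).getLastD [] = c) :
    PySem.Chars.endswith m (ch :: c) = true := by
  rw [PySem.Chars.endswith_iff]
  rcases List.eq_nil_or_concat (pvSplit1 ch m) with h | ⟨S', a, hS'⟩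
  · exact absurd h (pvSplit1_ne_nil ch m)
  · simp only [List.concat_eq_append] at hS'
    rw [hS', List.getLastD_concat] at hlast
    subst hlast
    have hdne : S' ≠ [] := by
      intro h
      rw [h] at hS'
      rw [hS'] at hlen; simp at hlen
    refine ⟨PySem.Chars.join [ch] S', ?_⟩
    have := pvJoin_split1 ch m
    rw [hS', pvJoin_append_singleton ch S' hdne] at this
    exact this

-- slice bridges used by B
theorem pvSlice_from (m : List Char) (k : Nat) :
    PySem.List.slice m (some ((k : Nat) : Int)) none = m.drop k := by
  simp [PySem.List.slice_from_natCast]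

theorem pvSlice_to (m : List Char) (k : Nat) :
    PySem.List.slice m none (some ((k : Nat) : Int)) = m.take k := by
  simp [PySem.List.slice_to_natCast]

-- one step of A's dict-building loop, observed through get? at a candidate key c,
-- equals one step of B's prefix/suffix loop for c
theorem pvStep_get (m c : List Char) (ch : Char) (hc : ch ∉ c)
    (d : PySem.Dict (List Char) (List Char)) :
    (pvAStep m d ch).get? c = pvBStep m c (d.get? c) ch := by
  have hsplit : (PySem.Chars.split? m [ch]).getD [] = pvSplit1 ch m := by
    simp [PySem.Chars.split?, pvSplitOn_single]
  simp only [pvAStep, pvBStep, hsplit]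
  by_cases hlen : 1 < (pvSplit1 ch m).length
  · rw [if_pos hlen]
    rw [PySem.Dict.get?_insert, PySem.Dict.get?_insert]
    by_cases hl : (pvSplit1 ch m).getLastD [] = c
    · -- suffix match: both sides take the endswith value
      have hend := pvLast_endswith ch c m hlen hl
      rw [if_pos hl.symm, hend, if_pos rfl]
      obtain ⟨u, hu⟩ := (PySem.Chars.endswith_iff m (ch :: c)).mp hend
      have hm : m = u ++ ch :: c := hu.symm
      have hSm : pvSplit1 ch m = pvSplit1 ch u ++ [c] := by
        rw [hm, pvSplit1_suffix ch c hc u]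
      have hdl : (pvSplit1 ch m).dropLast = pvSplit1 ch u := by
        rw [hSm, List.dropLast_concat]
      have hlenm : PySem.Chars.len m - PySem.Chars.len c - 1 = ((u.length : Nat) : Int) := by
        simp only [PySem.Chars.len_eq]
        rw [hm]; simp; ring
      rw [hdl, hlenm, pvSlice_to]
      congr 1
      rw [pvJoin_split1, hm]
      simp
    · -- no suffix match
      have hend : PySem.Chars.endswith m (ch :: c) = false := by
        by_contra hne
        have hend' : PySem.Chars.endswith m (ch :: c) = true := by
          cases h : PySem.Chars.endswith m (ch :: c) with
          | false => exact absurd h hne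
          | true => rfl
        obtain ⟨u, hu⟩ := (PySem.Chars.endswith_iff m (ch :: c)).mp hend'
        have hm : m = u ++ ch :: c := hu.symm
        have : (pvSplit1 ch m).getLastD [] = c := by
          rw [hm, pvSplit1_suffix ch c hc u]; simp
        exact hl this
      rw [if_neg (fun h => hl h.symm), hend]
      simp only [Bool.false_eq_true, if_false]
      by_cases hh : (pvSplit1 ch m).headD [] = c
      · -- prefix match
        have hpre := pvHead_startswith ch c m hlen hh
        rw [if_pos hh.symm, hpre, if_pos rfl]
        obtain ⟨t, ht⟩ := (PySem.Chars.startswith_iff m (c ++ [ch])).mp hpre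
        have hm : m = c ++ ch :: t := by rw [← ht]; simp
        have hSm : pvSplit1 ch m = c :: pvSplit1 ch t := by
          rw [hm, pvSplit1_prefix ch c t hc]
        have hlc : PySem.Chars.len c + 1 = (((c.length + 1 : Nat)) : Int) := by
          simp only [PySem.Chars.len_eq]; push_cast; ring
        rw [hlc, pvSlice_from]
        congr 1
        rw [hSm]
        simp only [List.drop_one, List.tail_cons]
        rw [pvJoin_split1, hm]
        simp [List.drop_append]
      · -- no prefix match either: both fall back
        have hpre : PySem.Chars.startswith m (c ++ [ch]) = false := by
          by_contra hne
          have hpre' : PySem.Chars.startswith m (c ++ [ch]) = true := by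
            cases h : PySem.Chars.startswith m (c ++ [ch]) with
            | false => exact absurd h hne
            | true => rfl
          obtain ⟨t, ht⟩ := (PySem.Chars.startswith_iff m (c ++ [ch])).mp hpre'
          have hm : m = c ++ ch :: t := by rw [← ht]; simp
          have : (pvSplit1 ch m).headD [] = c := by
            rw [hm, pvSplit1_prefix ch c t hc]; rfl
          exact hh this
        rw [if_neg (fun h => hh h.symm), hpre]
        simp
  · -- fewer than two blocks: no separator adjoins anything; B's tests both fail
    rw [if_neg hlen]
    have hpre : PySem.Chars.startswith m (c ++ [ch]) = false := by
      by_contra hne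
      have hpre' : PySem.Chars.startswith m (c ++ [ch]) = true := by
        cases h : PySem.Chars.startswith m (c ++ [ch]) with
        | false => exact absurd h hne
        | true => rfl
      obtain ⟨t, ht⟩ := (PySem.Chars.startswith_iff m (c ++ [ch])).mp hpre'
      have hm : m = c ++ ch :: t := by rw [← ht]; simp
      have : 1 < (pvSplit1 ch m).length := by
        rw [hm, pvSplit1_prefix ch c t hc]
        have := pvSplit1_ne_nil ch t
        cases h : pvSplit1 ch t with
        | nil => exact absurd h this
        | cons b r => simp
      exact hlen this
    have hend : PySem.Chars.endswith m (ch :: c) = false := by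
      by_contra hne
      have hend' : PySem.Chars.endswith m (ch :: c) = true := by
        cases h : PySem.Chars.endswith m (ch :: c) with
        | false => exact absurd h hne
        | true => rfl
      obtain ⟨u, hu⟩ := (PySem.Chars.endswith_iff m (ch :: c)).mp hend'
      have hm : m = u ++ ch :: c := hu.symm
      have : 1 < (pvSplit1 ch m).length := by
        rw [hm, pvSplit1_suffix ch c hc u]
        have := pvSplit1_ne_nil ch u
        cases h : pvSplit1 ch u with
        | nil => exact absurd h this
        | cons b r => simp
      exact hlen this
    rw [hpre, hend]
    simp

-- the whole dict fold, observed at a candidate key, is B's whole _find_rest fold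
theorem pvFold_get (m c : List Char) :
    ∀ (seps : List Char), (∀ ch ∈ seps, ch ∉ c) →
      ∀ d : PySem.Dict (List Char) (List Char),
        (seps.foldl (pvAStep m) d).get? c = seps.foldl (pvBStep m c) (d.get? c) := by
  intro seps
  induction seps with
  | nil => intro _ d; rfl
  | cons s ss ih =>
    intro h d
    simp only [List.foldl_cons]
    rw [ih (fun ch hch => h ch (List.mem_cons_of_mem _ hch))]
    rw [pvStep_get m c s (h s (List.mem_cons_self)) d]

theorem pvPatterns_get (m c : List Char) (hc : ∀ ch ∈ pvSepChars, ch ∉ c) :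
    (pvSepChars.foldl (pvAStep m) PySem.Dict.empty).get? c = pvBFindRest m c := by
  rw [pvFold_get m c pvSepChars hc]
  rfl

theorem pvLookup_eq (m : List Char) (label : String) (cands : List (List Char))
    (hc : ∀ c ∈ cands, ∀ ch ∈ pvSepChars, ch ∉ c) :
    pvALookup (pvSepChars.foldl (pvAStep m) PySem.Dict.empty) label cands =
      pvBScanC m label cands := by
  induction cands with
  | nil => rfl
  | cons c cs ih =>
    simp only [pvALookup, pvBScanC,
      pvPatterns_get m c (hc c List.mem_cons_self),
      ih (fun c' hc' => hc c' (List.mem_cons_of_mem _ hc'))]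

theorem pvScan_eq (metric_name : String) (subsets : List (String × List (List Char)))
    (hc : ∀ p ∈ subsets, ∀ c ∈ p.2, ∀ ch ∈ pvSepChars, ch ∉ c) :
    pvAScan metric_name (pvSepChars.foldl (pvAStep metric_name.toList) PySem.Dict.empty) subsets =
      pvBScan metric_name subsets := by
  induction subsets with
  | nil => rfl
  | cons p rest ih =>
    obtain ⟨label, cands⟩ := p
    simp only [pvAScan, pvBScan,
      pvLookup_eq metric_name.toList label cands (hc _ List.mem_cons_self),
      ih (fun p' hp' => hc p' (List.mem_cons_of_mem _ hp'))]

-- ===== VERDICT (by name: the statement is the Claim_ definition above) =====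
set_option maxRecDepth 10000 in
theorem split_subset_name_py_spec : Claim_equal_split_subset_name_py := by
  intro metric_name _
  unfold Spec_split_subset_name_py split_subset_name_py split_subset_name_py_alt
  refine pvScan_eq metric_name pvSubsets ?_
  intro p hp c hc ch hch
  fin_cases hp <;> fin_cases hch <;> simp_all <;> rcases hc with h | h <;> subst h <;> decide
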